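-- pv_equiv track=rewrite | github.com/vladsoto-vsa/CS35Final | IntrotoCompSci/labs/05/wheeloffortune.py | initPuzzle
-- ===== SOURCE A (Python) =====
-- def initPuzzle(answer):
--     """
--     Purpose: Convert answer given by makePhraseString into unkwowns
--     Parameters: answer -- the original phrase
--     Return: Returns the changed phrase to main
--     Side effects: None
--     """
--
--     letters = "abcdefghijklmnopqrstuvwxyz"
--     puzzle = []
--     for i in range(len(answer)):
--         if answer[i] in letters:
--             puzzle.append("*")
--         elif answer[i] == " ":
--             puzzle.append("_")
--         else:
--             puzzle.append(answer[i])
--     return puzzle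
-- ===== SOURCE B (Python) =====
-- def initPuzzle(answer):
--     def mask(word):
--         return ["*" if "a" <= ch <= "z" else ch for ch in word]
--     words = answer.split(" ")
--     puzzle = mask(words[0])
--     for word in words[1:]:
--         puzzle.append("_")
--         puzzle += mask(word)
--     return puzzle
-- ===== Notes on version B (the rewrite author's own statement) =====
-- stated objective: alternative
-- what changed: B splits the phrase on spaces once, masks the letters of each word via range comparison, and joins the masked words with underscore separators, replacing A's single index loop with three-way branching per character.
import Mathlib
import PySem

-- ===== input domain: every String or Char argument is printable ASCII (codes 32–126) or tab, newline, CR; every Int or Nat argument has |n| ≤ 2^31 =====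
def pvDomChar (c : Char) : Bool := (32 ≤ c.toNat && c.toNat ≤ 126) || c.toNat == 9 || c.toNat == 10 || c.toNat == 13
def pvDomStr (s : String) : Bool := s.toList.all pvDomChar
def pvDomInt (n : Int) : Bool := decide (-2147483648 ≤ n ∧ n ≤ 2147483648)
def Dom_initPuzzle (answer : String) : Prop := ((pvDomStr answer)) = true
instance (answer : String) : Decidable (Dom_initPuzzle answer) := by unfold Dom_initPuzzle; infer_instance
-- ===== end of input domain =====

-- B splits the phrase on spaces once, masks each word, and joins the masked words with "_"
-- separators, instead of A's per-character three-way branching loop (alternative decomposition).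

-- ===== PORT A =====
-- index loop 'for i in range(len(answer))' with the three branches in A's order;
-- i is always in range, so pyGetD with a dummy default is exact here
def initPuzzle (answer : String) : List String :=
  (PySem.List.pyRange 0 (answer.toList.length : Int) 1).foldl
    (fun puzzle i =>
      puzzle ++ [let c := PySem.List.pyGetD answer.toList i ' '
                 if c ∈ "abcdefghijklmnopqrstuvwxyz".toList then "*"
                 else if c = ' ' then "_"
                 else String.ofList [c]]) []

-- ===== PORT B =====
-- helper mask(word): list comprehension with the chained comparison "a" <= ch <= "z"
def pvMask (word : List Char) : List String :=
  word.map (fun ch => if 'a' ≤ ch ∧ ch ≤ 'z' then "*" else String.ofList [ch])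

-- words = answer.split(" "); puzzle = mask(words[0]); then append "_" and the next masked word
-- (str.split(" ") always yields a nonempty list, so the [] arm is unreachable)
def initPuzzle_alt (answer : String) : List String :=
  match PySem.Chars.splitOn answer.toList [' '] with
  | [] => []
  | w :: ws => ws.foldl (fun puzzle word => (puzzle ++ ["_"]) ++ pvMask word) (pvMask w)

-- ===== PRECONDITION & SPEC =====
def Spec_initPuzzle (answer : String) (out : List String) : Prop := out = initPuzzle_alt answer
instance (answer : String) (out : List String) : Decidable (Spec_initPuzzle answer out) := by unfold Spec_initPuzzle; infer_instance

-- ===== CLAIM =====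
def Claim_equal_initPuzzle : Prop := ∀ (answer : String), Dom_initPuzzle answer → Spec_initPuzzle answer (initPuzzle answer)

-- ===== LEMMAS AND PROOFS =====

-- the per-character map both sides compute (A's branch order)
def pvF (c : Char) : String :=
  if c ∈ "abcdefghijklmnopqrstuvwxyz".toList then "*"
  else if c = ' ' then "_" else String.ofList [c]

-- the separator + masked word that each later word contributes in B
def pvG (w : List Char) : List String := "_" :: pvMask w

-- split-on-space as a plain structural recursion (pre = current word so far)
def pvSplitSp : List Char → List Char → List (List Char)
  | pre, [] => [pre]
  | pre, c :: rest => if c = ' ' then pre :: pvSplitSp [] rest else pvSplitSp (pre ++ [c]) rest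

theorem pv_mem_letters_iff (c : Char) :
    c ∈ "abcdefghijklmnopqrstuvwxyz".toList ↔ ('a' ≤ c ∧ c ≤ 'z') := by
  rw [show "abcdefghijklmnopqrstuvwxyz".toList =
        ['a','b','c','d','e','f','g','h','i','j','k','l','m',
         'n','o','p','q','r','s','t','u','v','w','x','y','z'] from rfl]
  simp only [List.mem_cons, List.not_mem_nil, or_false]
  constructor
  · rintro (rfl|rfl|rfl|rfl|rfl|rfl|rfl|rfl|rfl|rfl|rfl|rfl|rfl|rfl|rfl|rfl|rfl|rfl|rfl|rfl|rfl|rfl|rfl|rfl|rfl|rfl) <;> exact ⟨by decide, by decide⟩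
  · rintro ⟨h1, h2⟩
    have h1' : 97 ≤ c.toNat := h1
    have h2' : c.toNat ≤ 122 := h2
    have hd : c.toNat = 97 ∨ c.toNat = 98 ∨ c.toNat = 99 ∨ c.toNat = 100 ∨ c.toNat = 101 ∨
        c.toNat = 102 ∨ c.toNat = 103 ∨ c.toNat = 104 ∨ c.toNat = 105 ∨ c.toNat = 106 ∨
        c.toNat = 107 ∨ c.toNat = 108 ∨ c.toNat = 109 ∨ c.toNat = 110 ∨ c.toNat = 111 ∨
        c.toNat = 112 ∨ c.toNat = 113 ∨ c.toNat = 114 ∨ c.toNat = 115 ∨ c.toNat = 116 ∨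
        c.toNat = 117 ∨ c.toNat = 118 ∨ c.toNat = 119 ∨ c.toNat = 120 ∨ c.toNat = 121 ∨
        c.toNat = 122 := by omega
    rcases hd with h|h|h|h|h|h|h|h|h|h|h|h|h|h|h|h|h|h|h|h|h|h|h|h|h|h <;>
      rw [← Char.ofNat_toNat c, h] <;> decide

theorem pv_splitSp_ne_nil : ∀ (cs pre : List Char), pvSplitSp pre cs ≠ [] := by
  intro cs
  induction cs with
  | nil => intro pre; simp [pvSplitSp]
  | cons c rest ih =>
    intro pre
    simp only [pvSplitSp]
    split_ifs
    · simp
    · exact ih _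

-- splitOn.go with sep = [' '] is pvSplitSp (the fuel always suffices)
theorem pv_go_eq : ∀ (fuel : Nat) (l : List Char), l.length ≤ fuel → ∀ (cur : List Char) (acc : List (List Char)),
    PySem.Chars.splitOn.go [' '] fuel l cur acc = acc.reverse ++ pvSplitSp cur.reverse l := by
  intro fuel
  induction fuel with
  | zero =>
    intro l hl cur acc
    have : l = [] := List.eq_nil_of_length_eq_zero (Nat.le_zero.mp hl)
    subst this
    simp [PySem.Chars.splitOn.go, pvSplitSp]
  | succ n ih =>
    intro l hl cur acc
    cases l with
    | nil => simp [PySem.Chars.splitOn.go, pvSplitSp]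
    | cons c rest =>
      simp only [PySem.Chars.splitOn.go]
      by_cases hc : c = ' '
      · subst hc
        have hp : [' '].isPrefixOf (' ' :: rest) = true := by simp [List.isPrefixOf]
        rw [if_pos hp]
        have hdrop : List.drop [' '].length (' ' :: rest) = rest := by simp
        rw [hdrop, ih rest (by simpa using Nat.le_of_succ_le_succ hl)]
        simp [pvSplitSp]
      · have hp : [' '].isPrefixOf (c :: rest) = false := by
          simp [List.isPrefixOf]
          exact fun h => absurd h.symm hc
        rw [if_neg (by simp [hp])]
        rw [ih rest (by simpa using Nat.le_of_succ_le_succ hl) (c :: cur) acc]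
        simp [pvSplitSp, hc]

theorem pv_splitOn_eq (cs : List Char) :
    PySem.Chars.splitOn cs [' '] = pvSplitSp [] cs := by
  unfold PySem.Chars.splitOn
  rw [pv_go_eq (cs.length + 1) cs (Nat.le_succ _)]
  simp

-- B's loop is an append fold: it contributes pvG of each later word
theorem pv_foldl_eq_flatMap : ∀ (ws : List (List Char)) (init : List String),
    ws.foldl (fun puzzle word => (puzzle ++ ["_"]) ++ pvMask word) init = init ++ ws.flatMap pvG := by
  intro ws
  induction ws with
  | nil => simp
  | cons w ws ih =>
    intro init
    rw [List.foldl_cons, ih]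
    simp [pvG]

-- the masked words joined by "_" ARE the per-character map
theorem pv_main : ∀ (cs pre w : List Char) (ws : List (List Char)),
    pvSplitSp pre cs = w :: ws → pvMask w ++ ws.flatMap pvG = pvMask pre ++ cs.map pvF := by
  intro cs
  induction cs with
  | nil =>
    intro pre w ws h
    simp only [pvSplitSp] at h
    injection h with h1 h2
    subst h1; subst h2
    simp
  | cons c rest ih =>
    intro pre w ws h
    by_cases hc : c = ' '
    · subst hc
      simp only [pvSplitSp] at h
      rcases h' : pvSplitSp [] rest with _ | ⟨w', ws'⟩
      · exact absurd h' (pv_splitSp_ne_nil rest [])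
      · rw [h'] at h
        injection h with h1 h2
        subst h1; subst h2
        have hrest := ih [] w' ws' h'
        simp only [pvMask, List.map_nil, List.nil_append] at hrest
        have hf : pvF ' ' = "_" := by decide
        calc pvMask pre ++ (w' :: ws').flatMap pvG
            = pvMask pre ++ ("_" :: (pvMask w' ++ ws'.flatMap pvG)) := by simp [pvG]
          _ = pvMask pre ++ (pvF ' ' :: rest.map pvF) := by
              simp only [pvMask] at hrest ⊢
              rw [hrest, hf]
          _ = pvMask pre ++ ((' ' :: rest).map pvF) := by simp
    · simp only [pvSplitSp, if_neg hc] at h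
      rw [ih (pre ++ [c]) w ws h]
      have hf : pvF c = (if 'a' ≤ c ∧ c ≤ 'z' then "*" else String.ofList [c]) := by
        unfold pvF
        rw [if_neg hc]
        by_cases hm : c ∈ "abcdefghijklmnopqrstuvwxyz".toList
        · rw [if_pos hm, if_pos ((pv_mem_letters_iff c).mp hm)]
        · rw [if_neg hm, if_neg (fun h => hm ((pv_mem_letters_iff c).mpr h))]
      simp [pvMask, hf]

-- A is the per-character map
theorem pv_A_eq_map (answer : String) : initPuzzle answer = answer.toList.map pvF := by
  unfold initPuzzle
  rw [PySem.List.foldl_pyRange_zero_pyGetD' answer.toList ' '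
        (fun acc c => acc ++ [if c ∈ "abcdefghijklmnopqrstuvwxyz".toList then "*"
                 else if c = ' ' then "_" else String.ofList [c]]) []]
  rw [PySem.List.foldl_append_singleton_eq_map]
  rfl

-- ===== VERDICT =====
theorem initPuzzle_spec : Claim_equal_initPuzzle := by
  intro answer _
  unfold Spec_initPuzzle
  rw [pv_A_eq_map]
  unfold initPuzzle_alt
  rw [pv_splitOn_eq]
  rcases h : pvSplitSp [] answer.toList with _ | ⟨w, ws⟩
  · exact absurd h (pv_splitSp_ne_nil answer.toList [])
  · show List.map pvF answer.toList = List.foldl (fun puzzle word => (puzzle ++ ["_"]) ++ pvMask word) (pvMask w) ws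
    rw [pv_foldl_eq_flatMap]
    have hm := pv_main answer.toList [] w ws h
    simp only [pvMask, List.map_nil, List.nil_append] at hm
    simp only [pvMask]
    rw [hm]
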